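-- pv_equiv track=rewrite | github.com/baloncek2662/advent-of-code-2024 | solutions/day_19.py | part_0_and_1
-- ===== SOURCE A (Python) =====
-- def make_pattern(towels, design, cache):
--     # We've made the entire design
--     if len(design) == 0:
--         return 1
--
--     if design in cache:
--         return cache[design]
--
--     total_count = 0
--     for towel in towels:
--         if design.startswith(towel):
--             res = make_pattern(towels, design[len(towel) :], cache)
--             if res > 0:
--                 total_count += res
--                 cache[design[len(towel) :]] = res
--     return total_count
--
-- def part_0_and_1(towels, designs):
--     count = 0
--     count_total = 0
--     cache = {}
--     for design in designs:
--         res = make_pattern(towels, design, cache)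
--         if res > 0:
--             count += 1
--             count_total += res
--     return f"{count}\n{count_total}"
-- ===== SOURCE B (Python) =====
-- def part_0_and_1(towels, designs):
--     counts = {}
--     for t in towels:
--         counts[t] = counts.get(t, 0) + 1
--     lengths = sorted({len(t) for t in towels})
--     count = 0
--     count_total = 0
--     for design in designs:
--         n = len(design)
--         dp = [0] * (n + 1)
--         dp[0] = 1
--         for i in range(n):
--             c = dp[i]
--             if c:
--                 for L in lengths:
--                     if i + L <= n:
--                         m = counts.get(design[i:i + L], 0)
--                         if m:
--                             dp[i + L] += c * m
--         res = dp[n]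
--         if res > 0:
--             count += 1
--             count_total += res
--     return f"{count}\n{count_total}"
-- ===== Notes on version B (the rewrite author's own statement) =====
-- stated objective: faster
-- what changed: Replaces A's top-down recursion with a shared cache that never memoizes zero results (exponential on unmatchable designs) by a towel index (multiplicity dict + sorted distinct lengths, built once) and a per-design forward DP over prefix positions (dp[i] = tilings of design[:i], zero-count positions skipped), removing the per-position towel scan, the recursion and the string-keyed cache; Pre_ only excludes the inputs (empty towel plus a non-empty design) on which A's recursion never terminates and raises RecursionError.
import Mathlib
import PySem

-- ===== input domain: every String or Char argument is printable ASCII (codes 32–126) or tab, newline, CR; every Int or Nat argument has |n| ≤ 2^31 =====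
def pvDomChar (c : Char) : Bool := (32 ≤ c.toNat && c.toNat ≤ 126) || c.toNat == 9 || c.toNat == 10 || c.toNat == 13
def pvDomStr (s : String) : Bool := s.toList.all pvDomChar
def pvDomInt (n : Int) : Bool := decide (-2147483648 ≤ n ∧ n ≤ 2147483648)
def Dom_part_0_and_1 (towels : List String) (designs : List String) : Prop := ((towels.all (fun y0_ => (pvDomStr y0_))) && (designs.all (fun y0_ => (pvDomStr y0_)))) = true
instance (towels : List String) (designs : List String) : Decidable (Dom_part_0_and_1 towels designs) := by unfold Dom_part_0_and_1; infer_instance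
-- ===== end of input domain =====

-- B replaces A's top-down recursion (whose cache never records zero counts, so unmatchable
-- designs can be exponential) by a towel index (counts dict + distinct lengths) and a per-design
-- forward DP table, fully memoized zeros included.

-- ===== PORT A =====
-- make_pattern: the cache dict is threaded through as state; the `fuel` parameter only makes the
-- recursion structurally total — under Pre_ every recursive call strictly shortens `design`, so
-- the initial fuel `len design + 1` never runs out and the 0-case is unreachable.
def makePattern (fuel : Nat) (towels : List String) (design : String)
    (cache : PySem.Dict String Int) : Int × PySem.Dict String Int :=
  match fuel with
  | 0 => (0, cache)
  | f + 1 =>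
    if PySem.Str.len design = 0 then (1, cache)
    else if cache.contains design then (cache.getD design 0, cache)
    else
      towels.foldl (fun acc towel =>
        if PySem.Str.startswith design towel then
          let suffix := PySem.Str.slice design (some (PySem.Str.len towel)) none
          let r := makePattern f towels suffix acc.2
          if r.1 > 0 then (acc.1 + r.1, r.2.insert suffix r.1) else (acc.1, r.2)
        else acc) (0, cache)

def part_0_and_1 (towels : List String) (designs : List String) : String :=
  let st := designs.foldl
    (fun (s : Int × Int × PySem.Dict String Int) design =>
      let r := makePattern ((PySem.Str.len design).toNat + 1) towels design s.2.2
      if r.1 > 0 then (s.1 + 1, s.2.1 + r.1, r.2) else (s.1, s.2.1, r.2))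
    (0, 0, PySem.Dict.empty)
  PySem.Int.toStr st.1 ++ "\n" ++ PySem.Int.toStr st.2.1

-- ===== PORT B =====
-- Forward DP with a towel index: counts = multiset of towels (dict), lengths = sorted distinct
-- towel lengths; dp[i] = number of tilings of design[:i], zero positions skipped but recorded.
def dpDesign (counts : PySem.Dict String Int) (lengths : List Int) (design : String) : Int :=
  let n : Int := PySem.Str.len design
  let dp1 : List Int := PySem.List.pySetD (List.replicate (n + 1).toNat 0) 0 1
  let dp := (PySem.List.pyRange 0 n 1).foldl (fun dp i =>
    let c := PySem.List.pyGetD dp i 0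
    if c ≠ 0 then
      lengths.foldl (fun dp L =>
        if i + L ≤ n then
          let m := counts.getD (PySem.Str.slice design (some i) (some (i + L))) 0
          if m ≠ 0 then
            PySem.List.pySetD dp (i + L) (PySem.List.pyGetD dp (i + L) 0 + c * m)
          else dp
        else dp) dp
    else dp) dp1
  PySem.List.pyGetD dp n 0

def part_0_and_1_alt (towels : List String) (designs : List String) : String :=
  let counts := towels.foldl (fun d t => d.insert t (d.getD t 0 + 1)) PySem.Dict.empty
  let lengths := PySem.List.sorted
    (PySem.Set.ofList (towels.map (fun t => PySem.Str.len t))) (fun x => x) false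
  let st := designs.foldl
    (fun (s : Int × Int) design =>
      let res := dpDesign counts lengths design
      if res > 0 then (s.1 + 1, s.2 + res) else s)
    ((0 : Int), (0 : Int))
  PySem.Int.toStr st.1 ++ "\n" ++ PySem.Int.toStr st.2

-- ===== PRECONDITION & SPEC =====
-- Pre_ excludes exactly the inputs where A raises: with "" among the towels and any non-empty
-- design, A's recursion never terminates (Python RecursionError).
def Pre_part_0_and_1 (towels : List String) (designs : List String) : Prop :=
  "" ∉ towels ∨ ∀ d ∈ designs, d = ""
instance (towels : List String) (designs : List String) : Decidable (Pre_part_0_and_1 towels designs) := by unfold Pre_part_0_and_1; infer_instance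
def pvWitness_part_0_and_1 : List String × List String := (["r", "wr", "b"], ["rb", "wrr", ""])

def Spec_part_0_and_1 (towels : List String) (designs : List String) (out : String) : Prop := out = part_0_and_1_alt towels designs
instance (towels : List String) (designs : List String) (out : String) : Decidable (Spec_part_0_and_1 towels designs out) := by unfold Spec_part_0_and_1; infer_instance

-- ===== CLAIM (what is proved, stated in full; the proofs are below) =====
def Claim_equal_part_0_and_1 : Prop := ∀ (towels : List String) (designs : List String), Dom_part_0_and_1 towels designs → Pre_part_0_and_1 towels designs → Spec_part_0_and_1 towels designs (part_0_and_1 towels designs)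

-- ===== LEMMAS AND PROOFS =====

-- The mathematical tiling count, with fuel (fuel-independent once fuel > length).
def waysF : Nat → List (List Char) → List Char → Int
  | 0, _, _ => 0
  | f + 1, ts, d =>
    if d = [] then 1
    else (ts.map (fun t => if t ≠ [] ∧ t <+: d then waysF f ts (d.drop t.length) else 0)).sum

def ways (ts : List (List Char)) (d : List Char) : Int := waysF (d.length + 1) ts d

theorem waysF_nonneg (f : Nat) (ts : List (List Char)) (d : List Char) : 0 ≤ waysF f ts d := by
  induction f generalizing d with
  | zero => simp [waysF]
  | succ f ih =>
    simp only [waysF]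
    split
    · norm_num
    · refine List.sum_nonneg ?_
      intro x hx
      simp only [List.mem_map] at hx
      obtain ⟨t, _, rfl⟩ := hx
      split
      · exact ih _
      · exact le_refl 0

theorem waysF_irrel (f f' : Nat) (ts : List (List Char)) (d : List Char)
    (h : d.length < f) (h' : d.length < f') : waysF f ts d = waysF f' ts d := by
  induction f generalizing f' d with
  | zero => omega
  | succ f ih =>
    cases f' with
    | zero => omega
    | succ f' =>
      simp only [waysF]
      split
      · rfl
      · rename_i hd
        congr 1
        refine List.map_congr_left ?_
        intro t _
        split
        · rename_i hc
          have ht : 0 < t.length := List.length_pos_iff.mpr hc.1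
          have hdl : 0 < d.length := List.length_pos_iff.mpr hd
          exact ih f' (d.drop t.length) (by simp; omega) (by simp; omega)
        · rfl

theorem ways_nil (ts : List (List Char)) : ways ts [] = 1 := by simp [ways, waysF]

theorem ways_nonneg (ts : List (List Char)) (d : List Char) : 0 ≤ ways ts d := waysF_nonneg _ _ _

theorem ways_unfold (ts : List (List Char)) (d : List Char) (hd : d ≠ []) :
    ways ts d = (ts.map (fun t => if t ≠ [] ∧ t <+: d then ways ts (d.drop t.length) else 0)).sum := by
  have hdl : 0 < d.length := List.length_pos_iff.mpr hd
  show waysF (d.length + 1) ts d = _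
  simp only [waysF, if_neg hd]
  congr 1
  refine List.map_congr_left ?_
  intro t _
  split
  · rename_i hc
    have ht : 0 < t.length := List.length_pos_iff.mpr hc.1
    exact waysF_irrel _ _ _ _ (by simp only [List.length_drop]; omega) (by simp only [List.length_drop]; omega)
  · rfl

def ValidCache (towels : List String) (cache : PySem.Dict String Int) : Prop :=
  ∀ k v, cache.get? k = some v → v = ways (towels.map String.toList) k.toList

theorem toList_ne_nil (t : String) (h : t ≠ "") : t.toList ≠ [] := by
  intro hc
  exact h (String.toList_inj.mp (by simp [hc]))

theorem makePattern_correct (towels : List String) (hne : ∀ t ∈ towels, t ≠ "")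
    (fuel : Nat) (design : String) (cache : PySem.Dict String Int)
    (hf : design.toList.length < fuel) (hc : ValidCache towels cache) :
    (makePattern fuel towels design cache).1 = ways (towels.map String.toList) design.toList ∧
      ValidCache towels (makePattern fuel towels design cache).2 := by
  induction fuel generalizing design cache with
  | zero => omega
  | succ f ih =>
    simp only [makePattern]
    by_cases h0 : PySem.Str.len design = 0
    · have hdn : design.toList = [] := by
        rw [PySem.Str.len_eq] at h0
        exact List.length_eq_zero_iff.mp (by omega)
      rw [if_pos h0]
      exact ⟨by simp [hdn, ways_nil], hc⟩
    · have hd : design.toList ≠ [] := by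
        intro hcon
        exact h0 (by rw [PySem.Str.len_eq, hcon]; rfl)
      have hdl : 0 < design.toList.length := List.length_pos_iff.mpr hd
      rw [if_neg h0]
      by_cases hct : cache.contains design
      · rw [if_pos hct]
        rw [PySem.Dict.contains_eq_isSome_get?] at hct
        obtain ⟨v, hv⟩ := Option.isSome_iff_exists.mp hct
        refine ⟨?_, hc⟩
        rw [PySem.Dict.getD_eq_get?_getD, hv]
        exact hc design v hv
      · rw [if_neg hct]
        have hfold : ∀ l : List String, (∀ t ∈ l, t ∈ towels) →
            ∀ (acc : Int) (c : PySem.Dict String Int), ValidCache towels c →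
            ((l.foldl (fun acc towel =>
                if PySem.Str.startswith design towel then
                  let suffix := PySem.Str.slice design (some (PySem.Str.len towel)) none
                  let r := makePattern f towels suffix acc.2
                  if r.1 > 0 then (acc.1 + r.1, r.2.insert suffix r.1) else (acc.1, r.2)
                else acc) (acc, c)).1
              = acc + (l.map (fun t => if t.toList ≠ [] ∧ t.toList <+: design.toList
                  then ways (towels.map String.toList) (design.toList.drop t.toList.length) else 0)).sum ∧
             ValidCache towels ((l.foldl (fun acc towel =>
                if PySem.Str.startswith design towel then
                  let suffix := PySem.Str.slice design (some (PySem.Str.len towel)) none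
                  let r := makePattern f towels suffix acc.2
                  if r.1 > 0 then (acc.1 + r.1, r.2.insert suffix r.1) else (acc.1, r.2)
                else acc) (acc, c)).2)) := by
          intro l hl
          induction l with
          | nil => intro acc c hcv; exact ⟨by simp, hcv⟩
          | cons t rest ihl =>
            intro acc c hcv
            have htne : t ≠ "" := hne t (hl t List.mem_cons_self)
            have htl : t.toList ≠ [] := toList_ne_nil t htne
            have htlen : 0 < t.toList.length := List.length_pos_iff.mpr htl
            simp only [List.foldl_cons, List.map_cons, List.sum_cons]
            by_cases hs : PySem.Str.startswith design t
            · have hpre : t.toList <+: design.toList := by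
                rw [PySem.Str.startswith_eq] at hs
                exact (PySem.Chars.startswith_iff _ _).mp hs
              rw [if_pos hs]
              have hsuffix : (PySem.Str.slice design (some (PySem.Str.len t)) none).toList
                  = design.toList.drop t.toList.length := by
                rw [PySem.Str.toList_slice, PySem.Chars.slice_eq_listSlice, PySem.Str.len_eq]
                exact PySem.List.slice_from_natCast _ _
              have hsl : (PySem.Str.slice design (some (PySem.Str.len t)) none).toList.length < f := by
                rw [hsuffix]
                have := hpre.length_le
                simp only [List.length_drop]
                omega
              obtain ⟨hr1, hr2⟩ := ih _ c hsl hcv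
              have hterm : (if t.toList ≠ [] ∧ t.toList <+: design.toList
                  then ways (towels.map String.toList) (design.toList.drop t.toList.length) else 0)
                  = ways (towels.map String.toList) (design.toList.drop t.toList.length) := by
                rw [if_pos ⟨htl, hpre⟩]
              by_cases hpos : (makePattern f towels (PySem.Str.slice design (some (PySem.Str.len t)) none) c).1 > 0
              · rw [if_pos hpos]
                have hvalid : ValidCache towels
                    ((makePattern f towels (PySem.Str.slice design (some (PySem.Str.len t)) none) c).2.insert
                      (PySem.Str.slice design (some (PySem.Str.len t)) none)
                      (makePattern f towels (PySem.Str.slice design (some (PySem.Str.len t)) none) c).1) := by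
                  intro k v hkv
                  by_cases hk : k = PySem.Str.slice design (some (PySem.Str.len t)) none
                  · subst hk
                    rw [PySem.Dict.get?_insert_self] at hkv
                    rw [← Option.some_inj.mp hkv, hr1]
                  · rw [PySem.Dict.get?_insert_of_ne _ _ hk] at hkv
                    exact hr2 k v hkv
                obtain ⟨hfi1, hfi2⟩ := ihl (fun x hx => hl x (List.mem_cons_of_mem _ hx)) _ _ hvalid
                refine ⟨?_, hfi2⟩
                rw [hfi1, hterm, hr1, hsuffix]
                ring
              · rw [if_neg hpos]
                have hz : (makePattern f towels (PySem.Str.slice design (some (PySem.Str.len t)) none) c).1 = 0 := by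
                  have := ways_nonneg (towels.map String.toList)
                    (PySem.Str.slice design (some (PySem.Str.len t)) none).toList
                  omega
                obtain ⟨hfi1, hfi2⟩ := ihl (fun x hx => hl x (List.mem_cons_of_mem _ hx)) _ _ hr2
                refine ⟨?_, hfi2⟩
                rw [hfi1, hterm, ← hsuffix, ← hr1, hz]
                ring
            · rw [if_neg hs]
              have hnp : ¬ t.toList <+: design.toList := by
                intro hcon
                exact hs (by rw [PySem.Str.startswith_eq]; exact (PySem.Chars.startswith_iff _ _).mpr hcon)
              obtain ⟨hfi1, hfi2⟩ := ihl (fun x hx => hl x (List.mem_cons_of_mem _ hx)) acc c hcv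
              refine ⟨hfi1.trans ?_, hfi2⟩
              rw [if_neg (by tauto)]
              ring
        obtain ⟨h1, h2⟩ := hfold towels (fun _ h => h) 0 cache hc
        refine ⟨?_, h2⟩
        rw [h1, ways_unfold _ _ hd, List.map_map, zero_add]
        exact congrArg List.sum (List.map_congr_left (fun t _ => rfl))

theorem getD_set_int (l : List Int) (m j : Nat) (v : Int) :
    (l.set m v).getD j 0 = if j = m ∧ m < l.length then v else l.getD j 0 := by
  simp only [List.getD, List.getElem?_set]
  split_ifs with h1 h2 h3 h4 <;> simp_all

def phi (ts : List (List Char)) (d : List Char) (dp : List Int) (i : Nat) : Int :=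
  ∑ j ∈ Finset.Ico i (d.length + 1), dp.getD j 0 * ways ts (d.drop j)

theorem phi_split (ts : List (List Char)) (d : List Char) (dp : List Int) (i : Nat)
    (h : i < d.length + 1) :
    phi ts d dp i = dp.getD i 0 * ways ts (d.drop i) + phi ts d dp (i + 1) := by
  unfold phi
  rw [Finset.sum_eq_sum_Ico_succ_bot h]

theorem phi_top (ts : List (List Char)) (d : List Char) (dp : List Int) :
    phi ts d dp d.length = dp.getD d.length 0 := by
  rw [phi_split ts d dp d.length (by omega)]
  unfold phi
  rw [Finset.Ico_self, Finset.sum_empty, List.drop_length, ways_nil]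
  ring

theorem phi_set (ts : List (List Char)) (d : List Char) (dp : List Int) (i p : Nat) (v : Int)
    (hp1 : i ≤ p) (hp2 : p ≤ d.length) (hlen : dp.length = d.length + 1) :
    phi ts d (dp.set p (dp.getD p 0 + v)) i = phi ts d dp i + v * ways ts (d.drop p) := by
  unfold phi
  have hmem : p ∈ Finset.Ico i (d.length + 1) := Finset.mem_Ico.mpr ⟨hp1, by omega⟩
  have hterm : ∀ j ∈ Finset.Ico i (d.length + 1),
      (dp.set p (dp.getD p 0 + v)).getD j 0 * ways ts (d.drop j)
        = dp.getD j 0 * ways ts (d.drop j) + (if j = p then v * ways ts (d.drop p) else 0) := by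
    intro j _
    rw [getD_set_int]
    by_cases hj : j = p
    · subst hj
      rw [if_pos ⟨rfl, by omega⟩, if_pos rfl]
      ring
    · rw [if_neg (by tauto), if_neg hj]
      ring
  rw [Finset.sum_congr rfl hterm, Finset.sum_add_distrib, Finset.sum_ite_eq' _ p]
  rw [if_pos hmem]

def lensOf (towels : List String) : List Int :=
  PySem.List.sorted (PySem.Set.ofList (towels.map (fun t => PySem.Str.len t))) (fun x => x) false

theorem count_sum_int (l : List String) (a : String) (w : Int) :
    (l.map (fun x => if x = a then w else 0)).sum = (l.count a : Int) * w := by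
  induction l with
  | nil => simp
  | cons x xs ih =>
    simp only [List.map_cons, List.sum_cons, List.count_cons, ih]
    by_cases hx : x = a
    · subst hx; simp; push_cast; ring
    · rw [if_neg hx, if_neg (by simpa using hx)]
      push_cast; ring

-- the towel sum partitioned by towel length: the per-length indexed terms of B
-- add up to the per-towel terms of `ways`
theorem sum_by_lengths (ts : List (List Char)) (design : String) (i : Nat)
    (hi : i ≤ design.toList.length) :
    ∀ (ls : List Int) (xs : List String), ls.Nodup → (∀ L ∈ ls, 0 < L) →
      (∀ x ∈ xs, PySem.Str.len x ∈ ls) → (∀ x ∈ xs, x ≠ "") →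
      (ls.map (fun L => if (i : Int) + L ≤ (design.toList.length : Int)
          then ((xs.count (PySem.Str.slice design (some (i : Int)) (some ((i : Int) + L))) : Int)
            * ways ts (design.toList.drop (i + L.toNat)))
          else 0)).sum
      = (xs.map (fun t => if t.toList ≠ [] ∧ t.toList <+: design.toList.drop i
          then ways ts ((design.toList.drop i).drop t.toList.length) else 0)).sum := by
  intro ls
  induction ls with
  | nil =>
    intro xs _ _ hlen _
    have hxs : xs = [] := by
      refine List.eq_nil_iff_forall_not_mem.mpr (fun x hx => ?_)
      simpa using hlen x hx
    simp [hxs]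
  | cons L ls' ih =>
    intro xs hnd hpos hlen hnee
    have hLpos : 0 < L := hpos L List.mem_cons_self
    obtain ⟨k, hk⟩ : ∃ k : Nat, L = (k : Int) := ⟨L.toNat, (Int.toNat_of_nonneg (by omega)).symm⟩
    have hkpos : 0 < k := by omega
    -- split xs by whether the towel has length L
    have hperm := List.filter_append_perm (fun x => PySem.Str.len x == L) xs
    have hsplit : (xs.map (fun t => if t.toList ≠ [] ∧ t.toList <+: design.toList.drop i
          then ways ts ((design.toList.drop i).drop t.toList.length) else 0)).sum
        = ((xs.filter (fun x => PySem.Str.len x == L)).map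
            (fun t => if t.toList ≠ [] ∧ t.toList <+: design.toList.drop i
              then ways ts ((design.toList.drop i).drop t.toList.length) else 0)).sum
          + ((xs.filter (fun x => !(PySem.Str.len x == L))).map
            (fun t => if t.toList ≠ [] ∧ t.toList <+: design.toList.drop i
              then ways ts ((design.toList.drop i).drop t.toList.length) else 0)).sum := by
      rw [← List.sum_append, ← List.map_append]
      exact ((hperm.map _).sum_eq).symm
    rw [hsplit, List.map_cons, List.sum_cons]
    have hcast : (i : Int) + L = ((i + k : Nat) : Int) := by rw [hk]; push_cast; ring
    have hslice : (PySem.Str.slice design (some (i : Int)) (some ((i : Int) + L))).toList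
        = (design.toList.drop i).take k := by
      rw [hcast, PySem.Str.toList_slice, PySem.Chars.slice_eq_listSlice]
      exact_mod_cast PySem.List.slice_natCast_add design.toList i k
    have hfirst : (if (i : Int) + L ≤ (design.toList.length : Int)
          then ((xs.count (PySem.Str.slice design (some (i : Int)) (some ((i : Int) + L))) : Int)
            * ways ts (design.toList.drop (i + L.toNat)))
          else 0)
        = ((xs.filter (fun x => PySem.Str.len x == L)).map
            (fun t => if t.toList ≠ [] ∧ t.toList <+: design.toList.drop i
              then ways ts ((design.toList.drop i).drop t.toList.length) else 0)).sum := by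
      by_cases hg : (i : Int) + L ≤ (design.toList.length : Int)
      · have hkn : i + k ≤ design.toList.length := by omega
        have hslen : ((design.toList.drop i).take k).length = k := by
          simp only [List.length_take, List.length_drop]
          omega
        have hmap : ∀ x ∈ xs.filter (fun x => PySem.Str.len x == L),
            (if x.toList ≠ [] ∧ x.toList <+: design.toList.drop i
              then ways ts ((design.toList.drop i).drop x.toList.length) else 0)
            = (if x = PySem.Str.slice design (some (i : Int)) (some ((i : Int) + L))
                then ways ts (design.toList.drop (i + L.toNat)) else 0) := by
          intro x hx
          obtain ⟨hxmem, hxlen⟩ := List.mem_filter.mp hx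
          have hxlen' : x.toList.length = k := by
            have := beq_iff_eq.mp hxlen
            rw [PySem.Str.len_eq, hk] at this
            exact_mod_cast this
          have hxne : x.toList ≠ [] := toList_ne_nil x (hnee x hxmem)
          have hiff : x.toList <+: design.toList.drop i
              ↔ x = PySem.Str.slice design (some (i : Int)) (some ((i : Int) + L)) := by
            rw [List.prefix_iff_eq_take, hxlen', ← hslice, String.toList_inj]
          by_cases hpre : x.toList <+: design.toList.drop i
          · rw [if_pos ⟨hxne, hpre⟩, if_pos (hiff.mp hpre), hxlen', List.drop_drop,
              hk, Int.toNat_natCast]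
          · rw [if_neg (by tauto), if_neg (fun h => hpre (hiff.mpr h))]
        rw [if_pos hg, List.map_congr_left hmap, count_sum_int]
        have hcount : (xs.filter (fun x => PySem.Str.len x == L)).count
              (PySem.Str.slice design (some (i : Int)) (some ((i : Int) + L)))
            = xs.count (PySem.Str.slice design (some (i : Int)) (some ((i : Int) + L))) := by
          refine List.count_filter ?_
          rw [beq_iff_eq, PySem.Str.len_eq, hslice, hk]
          exact_mod_cast congrArg (Nat.cast (R := Int)) hslen
        rw [hcount]
      · rw [if_neg hg]
        refine (List.sum_eq_zero ?_).symm
        intro y hy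
        obtain ⟨x, hx, rfl⟩ := List.mem_map.mp hy
        obtain ⟨hxmem, hxlen⟩ := List.mem_filter.mp hx
        have hxlen' : x.toList.length = k := by
          have := beq_iff_eq.mp hxlen
          rw [PySem.Str.len_eq, hk] at this
          exact_mod_cast this
        rw [if_neg]
        rintro ⟨-, hpre⟩
        have := hpre.length_le
        simp only [List.length_drop, hxlen'] at this
        omega
    have hrest : (ls'.map (fun L => if (i : Int) + L ≤ (design.toList.length : Int)
          then ((xs.count (PySem.Str.slice design (some (i : Int)) (some ((i : Int) + L))) : Int)
            * ways ts (design.toList.drop (i + L.toNat)))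
          else 0)).sum
        = ((xs.filter (fun x => !(PySem.Str.len x == L))).map
            (fun t => if t.toList ≠ [] ∧ t.toList <+: design.toList.drop i
              then ways ts ((design.toList.drop i).drop t.toList.length) else 0)).sum := by
      have hLnot : L ∉ ls' := (List.nodup_cons.mp hnd).1
      have hcongr : ∀ L' ∈ ls', (if (i : Int) + L' ≤ (design.toList.length : Int)
            then ((xs.count (PySem.Str.slice design (some (i : Int)) (some ((i : Int) + L'))) : Int)
              * ways ts (design.toList.drop (i + L'.toNat)))
            else 0)
          = (if (i : Int) + L' ≤ (design.toList.length : Int)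
            then (((xs.filter (fun x => !(PySem.Str.len x == L))).count
                (PySem.Str.slice design (some (i : Int)) (some ((i : Int) + L'))) : Int)
              * ways ts (design.toList.drop (i + L'.toNat)))
            else 0) := by
        intro L' hL'
        by_cases hg : (i : Int) + L' ≤ (design.toList.length : Int)
        · rw [if_pos hg, if_pos hg]
          have hL'pos : 0 < L' := hpos L' (List.mem_cons_of_mem _ hL')
          obtain ⟨k', hk'⟩ : ∃ k' : Nat, L' = (k' : Int) :=
            ⟨L'.toNat, (Int.toNat_of_nonneg (by omega)).symm⟩
          have hcast' : (i : Int) + L' = ((i + k' : Nat) : Int) := by rw [hk']; push_cast; ring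
          have hslice' : (PySem.Str.slice design (some (i : Int)) (some ((i : Int) + L'))).toList
              = (design.toList.drop i).take k' := by
            rw [hcast', PySem.Str.toList_slice, PySem.Chars.slice_eq_listSlice]
            exact_mod_cast PySem.List.slice_natCast_add design.toList i k'
          have hslen' : ((design.toList.drop i).take k').length = k' := by
            simp only [List.length_take, List.length_drop]
            omega
          have : (xs.filter (fun x => !(PySem.Str.len x == L))).count
                (PySem.Str.slice design (some (i : Int)) (some ((i : Int) + L')))
              = xs.count (PySem.Str.slice design (some (i : Int)) (some ((i : Int) + L'))) := by
            refine List.count_filter ?_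
            rw [Bool.not_eq_eq_eq_not, Bool.not_true, beq_eq_false_iff_ne]
            rw [PySem.Str.len_eq, hslice']
            intro hcon
            apply hLnot
            have : L = ((k' : Nat) : Int) := by rw [← hcon]; exact_mod_cast hslen'
            rw [this, ← hk']
            exact hL'
          rw [this]
        · rw [if_neg hg, if_neg hg]
      rw [List.map_congr_left hcongr]
      refine ih _ (List.nodup_cons.mp hnd).2 (fun L' hL' => hpos L' (List.mem_cons_of_mem _ hL')) ?_ ?_
      · intro x hx
        obtain ⟨hxmem, hxne⟩ := List.mem_filter.mp hx
        have := hlen x hxmem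
        rcases List.mem_cons.mp this with h | h
        · exfalso
          rw [Bool.not_eq_eq_eq_not, Bool.not_true, beq_eq_false_iff_ne] at hxne
          exact hxne h
        · exact h
      · exact fun x hx => hnee x (List.mem_filter.mp hx).1
    rw [hfirst, hrest]

theorem dpDesign_correct (towels : List String) (hne : ∀ t ∈ towels, t ≠ "")
    (design : String) :
    dpDesign (PySem.Dict.counter towels) (lensOf towels) design
      = ways (towels.map String.toList) design.toList := by
  simp only [dpDesign]
  rw [PySem.Str.len_eq]
  set d := design.toList with hd
  set n := d.length with hn
  have hcast1 : ((n : Int) + 1).toNat = n + 1 := by omega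
  have hlpos : ∀ L ∈ lensOf towels, 0 < L := by
    intro L hL
    rw [lensOf, PySem.List.mem_sorted, PySem.Set.mem_ofList] at hL
    obtain ⟨t, ht, rfl⟩ := List.mem_map.mp hL
    have := toList_ne_nil t (hne t ht)
    rw [PySem.Str.len_eq]
    have := List.length_pos_iff.mpr this
    omega
  -- the inner loop over towel lengths at a reachable position i
  have hinner : ∀ (i : Nat), i < n → ∀ (c : Int) (ls : List Int), (∀ L ∈ ls, 0 < L) →
      ∀ dp : List Int, dp.length = n + 1 →
      ((ls.foldl (fun dp L =>
          if (i : Int) + L ≤ (n : Int) then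
            let m := (PySem.Dict.counter towels).getD
              (PySem.Str.slice design (some (i : Int)) (some ((i : Int) + L))) 0
            if m ≠ 0 then
              PySem.List.pySetD dp ((i : Int) + L) (PySem.List.pyGetD dp ((i : Int) + L) 0 + c * m)
            else dp
          else dp) dp).length = n + 1 ∧
       (ls.foldl (fun dp L =>
          if (i : Int) + L ≤ (n : Int) then
            let m := (PySem.Dict.counter towels).getD
              (PySem.Str.slice design (some (i : Int)) (some ((i : Int) + L))) 0
            if m ≠ 0 then
              PySem.List.pySetD dp ((i : Int) + L) (PySem.List.pyGetD dp ((i : Int) + L) 0 + c * m)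
            else dp
          else dp) dp).getD i 0 = dp.getD i 0 ∧
       phi (towels.map String.toList) d
          (ls.foldl (fun dp L =>
            if (i : Int) + L ≤ (n : Int) then
              let m := (PySem.Dict.counter towels).getD
                (PySem.Str.slice design (some (i : Int)) (some ((i : Int) + L))) 0
              if m ≠ 0 then
                PySem.List.pySetD dp ((i : Int) + L) (PySem.List.pyGetD dp ((i : Int) + L) 0 + c * m)
              else dp
            else dp) dp) (i + 1)
         = phi (towels.map String.toList) d dp (i + 1)
           + c * (ls.map (fun L => if (i : Int) + L ≤ (n : Int)
                then ((towels.count (PySem.Str.slice design (some (i : Int)) (some ((i : Int) + L))) : Int)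
                  * ways (towels.map String.toList) (d.drop (i + L.toNat)))
                else 0)).sum) := by
    intro i hi c ls hposls
    induction ls with
    | nil => intro dp hlen; exact ⟨hlen, rfl, by simp⟩
    | cons L rest ihl =>
      intro dp hlen
      have hLpos : 0 < L := hposls L List.mem_cons_self
      obtain ⟨k, hk⟩ : ∃ k : Nat, L = (k : Int) := ⟨L.toNat, (Int.toNat_of_nonneg (by omega)).symm⟩
      have hkpos : 0 < k := by omega
      simp only [List.foldl_cons, List.map_cons, List.sum_cons]
      have hm : (PySem.Dict.counter towels).getD
            (PySem.Str.slice design (some (i : Int)) (some ((i : Int) + L))) 0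
          = (towels.count (PySem.Str.slice design (some (i : Int)) (some ((i : Int) + L))) : Int) :=
        PySem.Dict.getD_counter _ _
      by_cases hg : (i : Int) + L ≤ (n : Int)
      · have hkn : i + k ≤ n := by omega
        have htoNat : ((i : Int) + L).toNat = i + k := by omega
        by_cases hmz : (towels.count (PySem.Str.slice design (some (i : Int)) (some ((i : Int) + L))) : Int) ≠ 0
        · have happ : (if (i : Int) + L ≤ (n : Int) then
                let m := (PySem.Dict.counter towels).getD
                  (PySem.Str.slice design (some (i : Int)) (some ((i : Int) + L))) 0
                if m ≠ 0 then
                  PySem.List.pySetD dp ((i : Int) + L) (PySem.List.pyGetD dp ((i : Int) + L) 0 + c * m)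
                else dp
              else dp)
              = dp.set (i + k) (dp.getD (i + k) 0
                  + c * (towels.count (PySem.Str.slice design (some (i : Int)) (some ((i : Int) + L))) : Int)) := by
            rw [if_pos hg]
            simp only [hm]
            rw [if_pos hmz, PySem.List.pySetD_of_nonneg _ _ (by omega),
              PySem.List.pyGetD_of_nonneg _ _ (by omega), htoNat]
          rw [happ]
          obtain ⟨hL', hU, hP⟩ := ihl (fun x hx => hposls x (List.mem_cons_of_mem _ hx))
            (dp.set (i + k) (dp.getD (i + k) 0
              + c * (towels.count (PySem.Str.slice design (some (i : Int)) (some ((i : Int) + L))) : Int)))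
            (by rw [List.length_set]; exact hlen)
          refine ⟨hL', ?_, ?_⟩
          · rw [hU, getD_set_int, if_neg (by omega)]
          · rw [hP, phi_set _ _ _ _ _ _ (by omega) (by omega) hlen,
              if_pos hg, hk, Int.toNat_natCast]
            ring
        · have happ : (if (i : Int) + L ≤ (n : Int) then
                let m := (PySem.Dict.counter towels).getD
                  (PySem.Str.slice design (some (i : Int)) (some ((i : Int) + L))) 0
                if m ≠ 0 then
                  PySem.List.pySetD dp ((i : Int) + L) (PySem.List.pyGetD dp ((i : Int) + L) 0 + c * m)
                else dp
              else dp) = dp := by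
            rw [if_pos hg]
            simp only [hm]
            rw [if_neg hmz]
          rw [happ]
          rw [not_not] at hmz
          obtain ⟨hL', hU, hP⟩ := ihl (fun x hx => hposls x (List.mem_cons_of_mem _ hx)) dp hlen
          refine ⟨hL', hU, ?_⟩
          rw [hP, if_pos hg, hmz]
          ring
      · have happ : (if (i : Int) + L ≤ (n : Int) then
              let m := (PySem.Dict.counter towels).getD
                (PySem.Str.slice design (some (i : Int)) (some ((i : Int) + L))) 0
              if m ≠ 0 then
                PySem.List.pySetD dp ((i : Int) + L) (PySem.List.pyGetD dp ((i : Int) + L) 0 + c * m)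
              else dp
            else dp) = dp := if_neg hg
        rw [happ]
        obtain ⟨hL', hU, hP⟩ := ihl (fun x hx => hposls x (List.mem_cons_of_mem _ hx)) dp hlen
        refine ⟨hL', hU, ?_⟩
        rw [hP, if_neg hg]
        ring
  -- outer position loop: phi is invariant
  have houter : ∀ (k i : Nat), i + k = n → ∀ dp : List Int, dp.length = n + 1 →
      ((PySem.List.pyRange (i : Int) (n : Int) 1).foldl (fun dp i =>
        let c := PySem.List.pyGetD dp i 0
        if c ≠ 0 then
          (lensOf towels).foldl (fun dp L =>
            if i + L ≤ (n : Int) then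
              let m := (PySem.Dict.counter towels).getD
                (PySem.Str.slice design (some i) (some (i + L))) 0
              if m ≠ 0 then
                PySem.List.pySetD dp (i + L) (PySem.List.pyGetD dp (i + L) 0 + c * m)
              else dp
            else dp) dp
        else dp) dp).getD n 0 = phi (towels.map String.toList) d dp i := by
    intro k
    induction k with
    | zero =>
      intro i hik dp hlen
      have : i = n := by omega
      subst this
      rw [PySem.List.pyRange_one_eq_nil le_rfl, List.foldl_nil, phi_top]
    | succ k ihk =>
      intro i hik dp hlen
      have hi : i < n := by omega
      rw [PySem.List.pyRange_one_cons (by omega), List.foldl_cons]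
      simp only []
      by_cases hc : PySem.List.pyGetD dp (i : Int) 0 ≠ 0
      · rw [if_pos hc]
        obtain ⟨hL, _, hP⟩ := hinner i hi (PySem.List.pyGetD dp (i : Int) 0) (lensOf towels)
          hlpos dp hlen
        have hcast : ((i : Int) + 1) = ((i + 1 : Nat) : Int) := by push_cast; ring
        rw [hcast, ihk (i + 1) (by omega) _ hL, hP]
        rw [phi_split _ _ _ i (by omega)]
        have hdrop_ne : d.drop i ≠ [] := by
          intro hcon
          have := congrArg List.length hcon
          simp only [List.length_drop, List.length_nil] at this
          omega
        rw [ways_unfold _ _ hdrop_ne, PySem.List.pyGetD_natCast]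
        have hsum := sum_by_lengths (towels.map String.toList) design i (by rw [← hd]; omega)
          (lensOf towels) towels
          (((PySem.List.sorted_perm _ _ _).nodup_iff).mpr (PySem.Set.nodup_ofList _))
          hlpos
          (fun x hx => by
            rw [lensOf, PySem.List.mem_sorted, PySem.Set.mem_ofList]
            exact List.mem_map.mpr ⟨x, hx, rfl⟩)
          hne
        rw [← hd, ← hn] at hsum
        rw [hsum, List.map_map]
        have : (towels.map ((fun t => if t ≠ [] ∧ t <+: d.drop i
            then ways (towels.map String.toList) ((d.drop i).drop t.length) else 0) ∘ String.toList)).sum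
            = (towels.map (fun t => if t.toList ≠ [] ∧ t.toList <+: d.drop i
            then ways (towels.map String.toList) ((d.drop i).drop t.toList.length) else 0)).sum :=
          congrArg List.sum (List.map_congr_left (fun t _ => rfl))
        rw [this]
        ring
      · rw [if_neg hc]
        rw [not_not] at hc
        have hcast : ((i : Int) + 1) = ((i + 1 : Nat) : Int) := by push_cast; ring
        rw [hcast, ihk (i + 1) (by omega) _ hlen]
        rw [phi_split _ _ _ i (by omega), PySem.List.pyGetD_natCast] at *
        rw [hc]
        ring
  have hset : PySem.List.pySetD (List.replicate ((n : Int) + 1).toNat (0 : Int)) 0 1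
      = (List.replicate (n + 1) (0 : Int)).set 0 1 := by
    rw [hcast1, PySem.List.pySetD_of_nonneg _ 1 (le_refl 0)]
    norm_num
  rw [hset]
  have hlen1 : ((List.replicate (n + 1) (0 : Int)).set 0 1).length = n + 1 := by
    simp
  have hz : ((0 : Nat) : Int) = 0 := by norm_num
  have hres := houter n 0 (by omega) _ hlen1
  rw [hz] at hres
  rw [PySem.List.pyGetD_natCast, hres]
  rw [phi_split _ _ _ 0 (by omega)]
  have htail : phi (towels.map String.toList) d ((List.replicate (n + 1) (0 : Int)).set 0 1) 1 = 0 := by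
    unfold phi
    refine Finset.sum_eq_zero ?_
    intro j hj
    have hj1 : 1 ≤ j := (Finset.mem_Ico.mp hj).1
    rw [getD_set_int, if_neg (by omega)]
    rw [List.getD_eq_getElem?_getD, List.getElem?_replicate]
    split <;> simp
  rw [htail, getD_set_int, if_pos ⟨rfl, by simp⟩, List.drop_zero]
  ring

theorem dpDesign_empty (counts : PySem.Dict String Int) (lengths : List Int) :
    dpDesign counts lengths "" = 1 := rfl

theorem makePattern_empty (f : Nat) (towels : List String) (cache : PySem.Dict String Int) :
    makePattern (f + 1) towels "" cache = (1, cache) := by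
  simp [makePattern, PySem.Str.len]

theorem fuel_eq (design : String) : (PySem.Str.len design).toNat + 1 = design.toList.length + 1 := by
  rw [PySem.Str.len_eq]; simp

theorem fold_main (towels : List String) (hne : ∀ t ∈ towels, t ≠ "") :
    ∀ (designs : List String) (c t : Int) (cache : PySem.Dict String Int), ValidCache towels cache →
    (designs.foldl (fun s design =>
        let r := makePattern ((PySem.Str.len design).toNat + 1) towels design s.2.2
        if r.1 > 0 then (s.1 + 1, s.2.1 + r.1, r.2) else (s.1, s.2.1, r.2))
        ((c, t, cache) : Int × Int × PySem.Dict String Int)).1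
      = (designs.foldl (fun s design =>
        let res := dpDesign (PySem.Dict.counter towels) (lensOf towels) design
        if res > 0 then (s.1 + 1, s.2 + res) else s) ((c, t) : Int × Int)).1
    ∧ (designs.foldl (fun s design =>
        let r := makePattern ((PySem.Str.len design).toNat + 1) towels design s.2.2
        if r.1 > 0 then (s.1 + 1, s.2.1 + r.1, r.2) else (s.1, s.2.1, r.2))
        ((c, t, cache) : Int × Int × PySem.Dict String Int)).2.1
      = (designs.foldl (fun s design =>
        let res := dpDesign (PySem.Dict.counter towels) (lensOf towels) design
        if res > 0 then (s.1 + 1, s.2 + res) else s) ((c, t) : Int × Int)).2 := by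
  intro designs
  induction designs with
  | nil => intro c t cache _; exact ⟨rfl, rfl⟩
  | cons design rest ihd =>
    intro c t cache hc
    have hfuel : design.toList.length < (PySem.Str.len design).toNat + 1 := by
      rw [fuel_eq]; omega
    obtain ⟨hr1, hr2⟩ := makePattern_correct towels hne _ design cache hfuel hc
    have hcw : dpDesign (PySem.Dict.counter towels) (lensOf towels) design
        = (makePattern ((PySem.Str.len design).toNat + 1) towels design cache).1 := by
      rw [dpDesign_correct towels hne design, hr1]
    simp only [List.foldl_cons]
    by_cases hpos : (makePattern ((PySem.Str.len design).toNat + 1) towels design cache).1 > 0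
    · rw [if_pos hpos, if_pos (by rw [hcw]; exact hpos), ← hcw]
      exact ihd _ _ _ hr2
    · rw [if_neg hpos, if_neg (by rw [hcw]; exact hpos)]
      exact ihd _ _ _ hr2

theorem fold_all_empty (towels : List String) :
    ∀ (designs : List String), (∀ d ∈ designs, d = "") →
    ∀ (c t : Int) (cache : PySem.Dict String Int),
    (designs.foldl (fun s design =>
        let r := makePattern ((PySem.Str.len design).toNat + 1) towels design s.2.2
        if r.1 > 0 then (s.1 + 1, s.2.1 + r.1, r.2) else (s.1, s.2.1, r.2))
        ((c, t, cache) : Int × Int × PySem.Dict String Int)).1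
      = (designs.foldl (fun s design =>
        let res := dpDesign (PySem.Dict.counter towels) (lensOf towels) design
        if res > 0 then (s.1 + 1, s.2 + res) else s) ((c, t) : Int × Int)).1
    ∧ (designs.foldl (fun s design =>
        let r := makePattern ((PySem.Str.len design).toNat + 1) towels design s.2.2
        if r.1 > 0 then (s.1 + 1, s.2.1 + r.1, r.2) else (s.1, s.2.1, r.2))
        ((c, t, cache) : Int × Int × PySem.Dict String Int)).2.1
      = (designs.foldl (fun s design =>
        let res := dpDesign (PySem.Dict.counter towels) (lensOf towels) design
        if res > 0 then (s.1 + 1, s.2 + res) else s) ((c, t) : Int × Int)).2 := by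
  intro designs
  induction designs with
  | nil => intro _ c t cache; exact ⟨rfl, rfl⟩
  | cons design rest ihd =>
    intro hall c t cache
    have hde : design = "" := hall design List.mem_cons_self
    subst hde
    simp only [List.foldl_cons, makePattern_empty, dpDesign_empty]
    rw [if_pos (by norm_num : (1 : Int) > 0), if_pos (by norm_num : (1 : Int) > 0)]
    exact ihd (fun d hd => hall d (List.mem_cons_of_mem _ hd)) _ _ _

-- ===== VERDICT (by name: the statement is the Claim_ definition above) =====
theorem part_0_and_1_spec : Claim_equal_part_0_and_1 := by
  intro towels designs _ hpre
  unfold Spec_part_0_and_1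
  simp only [part_0_and_1, part_0_and_1_alt]
  rw [PySem.Dict.foldl_insert_getD_add_one_eq_counter,
    show PySem.List.sorted (PySem.Set.ofList (towels.map (fun t => PySem.Str.len t)))
      (fun x => x) false = lensOf towels from rfl]
  cases hpre with
  | inl hno =>
    have hne : ∀ t ∈ towels, t ≠ "" := fun t ht h => hno (h ▸ ht)
    have hvempty : ValidCache towels PySem.Dict.empty := by
      intro k v hkv
      rw [PySem.Dict.get?_empty] at hkv
      exact absurd hkv (by simp)
    obtain ⟨h1, h2⟩ := fold_main towels hne designs 0 0 PySem.Dict.empty hvempty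
    rw [h1, h2]
  | inr hall =>
    obtain ⟨h1, h2⟩ := fold_all_empty towels designs hall 0 0 PySem.Dict.empty
    rw [h1, h2]
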